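-- pv_equiv track=rewrite | github.com/deanearlwright/AdventOfCode | 2018/02_InventoryManagementSystem/ims.py | twos_and_threes
-- ===== SOURCE A (Python) =====
-- from collections import Counter
--
-- def twos_and_threes(label):
--     "Return the number of characters that appear twice and three times"
--
--     # 1. Get the unique letters and their counts
--     counts = Counter(label)
--
--     # 2. Start with no twos or threes
--     twos = 0
--     threes = 0
--
--     # 3. Loop through all of the letters and counts
--     for letter in counts:
--         count = counts[letter]
--
--         # 4. Keep track of the number of twos and threes
--         if count == 2:
--             twos += 1
--         elif count == 3:
--             threes += 1
--
--     # 5. Return the number of twos and threes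
--     return [twos, threes]
-- ===== SOURCE B (Python) =====
-- def twos_and_threes(label):
--     "Return the number of characters that appear twice and three times"
--     s = sorted(label)
--     twos = 0
--     threes = 0
--     i = 0
--     n = len(s)
--     while i < n:
--         j = i + 1
--         while j < n and s[j] == s[i]:
--             j += 1
--         if j - i == 2:
--             twos += 1
--         elif j - i == 3:
--             threes += 1
--         i = j
--     return [twos, threes]
-- ===== Notes on version B (the rewrite author's own statement) =====
-- stated objective: alternative
-- what changed: Replaces A's frequency table (Counter, then a pass over its keys) with sort-then-scan: sort the characters and walk the sorted list once, measuring each run of equal characters and counting runs of length 2 and 3.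
import Mathlib
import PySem

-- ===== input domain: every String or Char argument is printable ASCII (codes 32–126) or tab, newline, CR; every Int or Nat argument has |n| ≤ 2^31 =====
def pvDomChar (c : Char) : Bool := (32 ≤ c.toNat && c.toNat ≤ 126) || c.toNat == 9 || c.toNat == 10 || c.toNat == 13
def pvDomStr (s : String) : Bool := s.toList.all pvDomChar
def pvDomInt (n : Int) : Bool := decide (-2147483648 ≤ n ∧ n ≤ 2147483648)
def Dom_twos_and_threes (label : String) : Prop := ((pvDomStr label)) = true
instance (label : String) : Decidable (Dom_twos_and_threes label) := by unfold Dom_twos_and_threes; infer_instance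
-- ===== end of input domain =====

-- B replaces A's Counter frequency table with sort-then-scan over runs of equal characters (objective: alternative).

-- ===== PORT A =====
def twos_and_threes (label : String) : List Int :=
  -- counts = Counter(label)
  let counts : PySem.Dict Char Int := PySem.Dict.counter label.toList
  -- twos = 0; threes = 0; loop over the keys of counts
  let tt : Int × Int := counts.keys.foldl (fun (tt : Int × Int) letter =>
    let count := counts.getD letter 0
    if count = 2 then (tt.1 + 1, tt.2)
    else if count = 3 then (tt.1, tt.2 + 1)
    else tt) (0, 0)
  [tt.1, tt.2]

-- ===== PORT B =====
-- Python B's outer while walks the sorted list run by run; the inner while that advances j past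
-- the run of characters equal to s[i] is ported as takeWhile/dropWhile on the remaining suffix
-- (exact: j - i = 1 + length of the equal prefix of the rest, and i = j moves to the suffix after it).
def pvRunScan : List Char → Int → Int → Int × Int
  | [], t, th => (t, th)
  | c :: rest, t, th =>
    let run : Int := 1 + ((rest.takeWhile (fun x => x == c)).length : Int)
    let tail := rest.dropWhile (fun x => x == c)
    if run = 2 then pvRunScan tail (t + 1) th
    else if run = 3 then pvRunScan tail t (th + 1)
    else pvRunScan tail t th
termination_by s _ _ => s.length
decreasing_by all_goals
  exact Nat.lt_succ_of_le (List.length_dropWhile_le _ rest)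

def twos_and_threes_alt (label : String) : List Int :=
  let s := PySem.List.sorted label.toList (fun x => x) false
  let tt := pvRunScan s 0 0
  [tt.1, tt.2]

-- ===== PRECONDITION & SPEC =====
def Spec_twos_and_threes (label : String) (out : List Int) : Prop := out = twos_and_threes_alt label
instance (label : String) (out : List Int) : Decidable (Spec_twos_and_threes label out) := by unfold Spec_twos_and_threes; infer_instance

-- ===== CLAIM (what is proved, stated in full; the proofs are below) =====
def Claim_equal_twos_and_threes : Prop := ∀ (label : String), Dom_twos_and_threes label → Spec_twos_and_threes label (twos_and_threes label)

-- ===== LEMMAS AND PROOFS =====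

-- A's fold over any key list counts how many keys have count 2 resp. 3.
lemma pvFoldA_eq (l : List Char) : ∀ (ks : List Char) (t th : Int),
    ks.foldl (fun (tt : Int × Int) c =>
      if ((l.count c : Int)) = 2 then (tt.1 + 1, tt.2)
      else if ((l.count c : Int)) = 3 then (tt.1, tt.2 + 1)
      else tt) (t, th)
    = (t + (ks.countP (fun c => decide ((l.count c : Int) = 2)) : Int),
       th + (ks.countP (fun c => decide ((l.count c : Int) = 3)) : Int)) := by
  intro ks
  induction ks with
  | nil => intro t th; simp
  | cons c ks ih =>
    intro t th
    simp only [List.foldl_cons, List.countP_cons]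
    by_cases h2 : ((l.count c : Int)) = 2
    · have h3 : ¬ ((l.count c : Int)) = 3 := by omega
      simp [h2, ih]; ring
    · by_cases h3 : ((l.count c : Int)) = 3
      · simp [h3, ih]; ring
      · simp [h2, h3, ih]

-- run scan on a sorted list counts the distinct characters with count 2 resp. 3
lemma pvRunScan_aux (n : Nat) : ∀ (s : List Char), s.length ≤ n → s.Pairwise (· ≤ ·) → ∀ (t th : Int),
    pvRunScan s t th
    = (t + (s.dedup.countP (fun c => decide ((s.count c : Int) = 2)) : Int),
       th + (s.dedup.countP (fun c => decide ((s.count c : Int) = 3)) : Int)) := by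
  induction n with
  | zero =>
    intro s hs _ t th
    have : s = [] := List.eq_nil_of_length_eq_zero (Nat.le_zero.mp hs)
    subst this; simp [pvRunScan]
  | succ n ih =>
    intro s hs hp t th
    match s with
    | [] => simp [pvRunScan]
    | c :: rest =>
      set tk := rest.takeWhile (fun x => x == c) with htk
      set dp := rest.dropWhile (fun x => x == c) with hdp
      have hsplit : tk ++ dp = rest := List.takeWhile_append_dropWhile
      have htkc : ∀ x ∈ tk, x = c := by
        intro x hx
        rw [htk] at hx
        have : (fun x => x == c) x = true := List.mem_takeWhile_imp (p := fun x => x == c) hx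
        simpa using this
      have hcrest : ∀ x ∈ rest, c ≤ x := (List.pairwise_cons.mp hp).1
      have hprest : rest.Pairwise (· ≤ ·) := (List.pairwise_cons.mp hp).2
      have hpdp : dp.Pairwise (· ≤ ·) := hprest.sublist (List.dropWhile_sublist _)
      -- c not in dp
      have hcdp : c ∉ dp := by
        intro hc
        obtain ⟨d, dp', hdp2⟩ : ∃ d dp', dp = d :: dp' :=
          List.exists_cons_of_ne_nil (List.ne_nil_of_mem hc)
        have hd : d ≠ c := by
          have h := List.head?_dropWhile_not (fun x => x == c) rest
          rw [← hdp, hdp2] at h; simpa using h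
        have hdrest : d ∈ rest := by
          rw [← hsplit, hdp2]; simp
        have hcd : c ≤ d := hcrest d hdrest
        rw [hdp2] at hc
        rcases List.mem_cons.mp hc with h | h
        · exact hd h.symm
        · have hdc' : d ≤ c := by
            rw [hdp2] at hpdp
            exact (List.pairwise_cons.mp hpdp).1 c h
          exact hd (le_antisymm hdc' hcd)
      -- count facts
      have htklen : tk.count c = tk.length := by
        rw [List.count_eq_length]; intro x hx; rw [htkc x hx]
      have hccount : (c :: rest).count c = tk.length + 1 := by
        rw [← hsplit]
        simp [List.count_append, htklen,
          List.count_eq_zero_of_not_mem hcdp]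
      have hne_count : ∀ x, x ≠ c → (c :: rest).count x = dp.count x := by
        intro x hx
        rw [← hsplit]
        have : tk.count x = 0 := List.count_eq_zero_of_not_mem (fun hm => hx (htkc x hm))
        simp [List.count_cons, List.count_append, this]
        exact fun h => hx h.symm
      -- dedup perm
      have hmemtk : ∀ x, x ∈ tk → x ∈ dp ∨ x = c := fun x hx => Or.inr (htkc x hx)
      have hnd2 : (c :: dp.dedup).Nodup := by
        rw [List.nodup_cons]
        exact ⟨fun hm => hcdp (List.mem_dedup.mp hm), List.nodup_dedup _⟩
      have hdedup : (c :: rest).dedup.Perm (c :: dp.dedup) := by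
        refine (List.perm_ext_iff_of_nodup (List.nodup_dedup _) hnd2).mpr ?_
        intro a
        rw [List.mem_dedup, List.mem_cons, List.mem_cons, List.mem_dedup, ← hsplit,
          List.mem_append]
        constructor
        · rintro (h | h | h)
          · exact Or.inl h
          · exact Or.inl (htkc a h)
          · exact Or.inr h
        · rintro (h | h)
          · exact Or.inl h
          · exact Or.inr (Or.inr h)
      -- countP decomposition
      have hcsplit : ∀ (k : Int),
          ((c :: rest).dedup.countP (fun x => decide (((c :: rest).count x : Int) = k)) : Nat)
          = (if ((c :: rest).count c : Int) = k then 1 else 0)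
            + dp.dedup.countP (fun x => decide ((dp.count x : Int) = k)) := by
        intro k
        rw [hdedup.countP_eq, List.countP_cons]
        have : dp.dedup.countP (fun x => decide (((c :: rest).count x : Int) = k))
             = dp.dedup.countP (fun x => decide ((dp.count x : Int) = k)) := by
          apply List.countP_congr
          intro x hx
          have hxdp : x ∈ dp := List.mem_dedup.mp hx
          have hxc : x ≠ c := fun h => hcdp (h ▸ hxdp)
          rw [hne_count x hxc]
        rw [this]
        simp only [decide_eq_true_eq, List.count_cons_self, Nat.cast_add, Nat.cast_one]
        exact Nat.add_comm _ _
      -- unfold one step of pvRunScan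
      have hdplen : dp.length ≤ n := by
        have h1 : dp.length ≤ rest.length := List.length_dropWhile_le _ _
        simp at hs; omega
      have hrun : (1 + (tk.length : Int)) = ((c :: rest).count c : Int) := by
        rw [hccount]; push_cast; ring
      rw [pvRunScan]
      simp only [← htk, ← hdp]
      rw [show (1 + (tk.length : Int)) = ((c :: rest).count c : Int) from hrun]
      by_cases h2 : ((c :: rest).count c : Int) = 2
      · have h3 : ¬ ((c :: rest).count c : Int) = 3 := by omega
        rw [if_pos h2, ih dp hdplen hpdp, hcsplit 2, hcsplit 3, if_pos h2, if_neg h3]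
        simp only [Prod.mk.injEq]
        constructor <;> (push_cast; omega)
      · by_cases h3 : ((c :: rest).count c : Int) = 3
        · rw [if_neg h2, if_pos h3, ih dp hdplen hpdp, hcsplit 2, hcsplit 3, if_neg h2, if_pos h3]
          simp only [Prod.mk.injEq]
          constructor <;> (push_cast; omega)
        · rw [if_neg h2, if_neg h3, ih dp hdplen hpdp, hcsplit 2, hcsplit 3, if_neg h2, if_neg h3]
          simp only [Prod.mk.injEq]
          constructor <;> (push_cast; omega)

-- ===== VERDICT (by name: the statement is the Claim_ definition above) =====
theorem twos_and_threes_spec : Claim_equal_twos_and_threes := by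
  intro label _
  unfold Spec_twos_and_threes twos_and_threes twos_and_threes_alt
  have hperm : (PySem.List.sorted label.toList (fun x => x) false).Perm label.toList :=
    PySem.List.sorted_perm _ _ _
  have hpair : (PySem.List.sorted label.toList (fun x => x) false).Pairwise (· ≤ ·) := by
    have := PySem.List.sorted_pairwise (xs := label.toList) (key := fun x => x)
    simpa using this
  have hB := pvRunScan_aux (PySem.List.sorted label.toList (fun x => x) false).length
    (PySem.List.sorted label.toList (fun x => x) false) le_rfl hpair 0 0
  have hA := pvFoldA_eq label.toList (PySem.Set.ofList label.toList) 0 0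
  have hdperm : (PySem.List.sorted label.toList (fun x => x) false).dedup.Perm
      (PySem.Set.ofList label.toList) := by
    refine (List.perm_ext_iff_of_nodup (List.nodup_dedup _) (PySem.Set.nodup_ofList _)).mpr ?_
    intro a
    rw [List.mem_dedup, PySem.Set.mem_ofList, hperm.mem_iff]
  have hcp : ∀ (k : Int),
      (PySem.List.sorted label.toList (fun x => x) false).dedup.countP
        (fun c => decide (((PySem.List.sorted label.toList (fun x => x) false).count c : Int) = k))
      = (PySem.Set.ofList label.toList).countP
        (fun c => decide ((label.toList.count c : Int) = k)) := by
    intro k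
    rw [List.countP_congr (fun x _ => by rw [hperm.count_eq]), hdperm.countP_eq]
  simp only [PySem.Dict.keys_counter, PySem.Dict.getD_counter]
  rw [hA, hB, hcp 2, hcp 3]
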